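-- pv_equiv track=rewrite | github.com/mrtkrkm/Tetris-Genetic-Algorithm-and-NN | Tetris/Utils.py | show_grid
-- ===== SOURCE A (Python) =====
-- def show_grid(loc):
--     '''
--     Create grid matrices with background
--     Default background is Black
--
--     :param loc:Position of the shape blokes
--     '''
--     grid = [[(0, 0, 0) for _ in range(10)] for _ in range(20)]
--
--     for i in range(len(grid)):
--         for j in range(len(grid[0])):
--             if (j, i) in loc:
--                 color = loc[(j, i)]
--                 grid[i][j] = color
--
--     return grid
-- ===== SOURCE B (Python) =====
-- def show_grid(loc):
--     '''
--     Create grid matrices with background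
--     Default background is Black
--
--     :param loc:Position of the shape blokes
--     '''
--     grid = [[(0, 0, 0)] * 10 for _ in range(20)]
--     for (j, i), color in loc.items():
--         if 0 <= i < 20 and 0 <= j < 10:
--             grid[i][j] = color
--     return grid
-- ===== Notes on version B (the rewrite author's own statement) =====
-- stated objective: simpler
-- what changed: Instead of scanning all 200 fixed grid cells and testing each for dict membership, B makes a single pass over loc.items() and writes each in-bounds position directly into the default grid.
import Mathlib
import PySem

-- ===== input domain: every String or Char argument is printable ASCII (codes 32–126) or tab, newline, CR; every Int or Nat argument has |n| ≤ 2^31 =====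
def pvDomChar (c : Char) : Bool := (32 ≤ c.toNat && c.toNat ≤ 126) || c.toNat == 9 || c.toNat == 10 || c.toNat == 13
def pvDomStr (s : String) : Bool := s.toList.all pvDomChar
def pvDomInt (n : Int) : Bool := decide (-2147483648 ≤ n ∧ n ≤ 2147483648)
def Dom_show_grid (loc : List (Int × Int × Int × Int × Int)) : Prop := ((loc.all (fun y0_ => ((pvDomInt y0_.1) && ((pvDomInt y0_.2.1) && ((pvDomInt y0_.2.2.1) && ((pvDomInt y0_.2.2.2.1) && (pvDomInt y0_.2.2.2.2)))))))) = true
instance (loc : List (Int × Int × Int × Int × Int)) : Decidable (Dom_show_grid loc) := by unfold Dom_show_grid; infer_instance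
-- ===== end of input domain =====

-- B iterates over the dict items with a bounds guard instead of scanning all 200 grid cells (objective: simpler).


-- ===== PORT A =====
-- loc is the dict {(j, i): color}, encoded as the association list of (j, i, r, g, b);
-- '(j, i) in loc' + 'loc[(j, i)]' is the first-match lookup loc.find?.
def show_grid (loc : List (Int × Int × Int × Int × Int)) : List (List (Int × Int × Int)) :=
  let grid := List.replicate 20 (List.replicate 10 ((0 : Int), (0 : Int), (0 : Int)))
  -- range(len(grid)) = range 20, range(len(grid[0])) = range 10
  (PySem.List.pyRange 0 20 1).foldl (fun g i =>
    (PySem.List.pyRange 0 10 1).foldl (fun g j =>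
      match loc.find? (fun p => p.1 == j && p.2.1 == i) with
      | some p => g.modify i.toNat (fun row => row.set j.toNat p.2.2)
      | none => g) g) grid

-- ===== PORT B =====
def show_grid_alt (loc : List (Int × Int × Int × Int × Int)) : List (List (Int × Int × Int)) :=
  let grid := List.replicate 20 (List.replicate 10 ((0 : Int), (0 : Int), (0 : Int)))
  loc.foldl (fun g p =>
    if 0 ≤ p.2.1 ∧ p.2.1 < 20 ∧ 0 ≤ p.1 ∧ p.1 < 10 then
      g.modify p.2.1.toNat (fun row => row.set p.1.toNat p.2.2)
    else g) grid

-- ===== PRECONDITION & SPEC =====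
-- Pre_ requires the keys (j, i) to be pairwise distinct — automatic for a Python dict;
-- only the association-list encoding can violate it (there A's first-match lookup and
-- B's overwrite-in-order would disagree).
def Pre_show_grid (loc : List (Int × Int × Int × Int × Int)) : Prop :=
  (loc.map (fun p => (p.1, p.2.1))).Nodup
instance (loc : List (Int × Int × Int × Int × Int)) : Decidable (Pre_show_grid loc) := by
  unfold Pre_show_grid; infer_instance
def pvWitness_show_grid : (List (Int × Int × Int × Int × Int)) :=
  [(1, 2, 255, 0, 0), (3, 4, 0, 255, 0), (-1, 30, 9, 9, 9)]
def Spec_show_grid (loc : List (Int × Int × Int × Int × Int)) (out : List (List (Int × Int × Int))) : Prop := out = show_grid_alt loc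
instance (loc : List (Int × Int × Int × Int × Int)) (out : List (List (Int × Int × Int))) : Decidable (Spec_show_grid loc out) := by unfold Spec_show_grid; infer_instance

-- ===== CLAIM (what is proved, stated in full; the proofs are below) =====
def Claim_equal_show_grid : Prop := ∀ (loc : List (Int × Int × Int × Int × Int)), Dom_show_grid loc → Pre_show_grid loc → Spec_show_grid loc (show_grid loc)

-- ===== LEMMAS AND PROOFS =====

-- grids of shape 20×10 represented by their cell function
def pvGridFun (f : Nat → Nat → Int × Int × Int) : List (List (Int × Int × Int)) :=
  (List.range 20).map (fun a => (List.range 10).map (f a))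

-- the value A's cell scan produces at row i, column y (default = current cell)
def pvCellA (loc : List (Int × Int × Int × Int × Int)) (i : Int) (y : Nat)
    (dflt : Int × Int × Int) : Int × Int × Int :=
  match loc.find? (fun p => p.1 == (y : Int) && p.2.1 == i) with
  | some p => p.2.2
  | none => dflt

-- the cell function B's fold over loc builds from f
def pvG (loc : List (Int × Int × Int × Int × Int)) (f : Nat → Nat → Int × Int × Int) :
    Nat → Nat → Int × Int × Int :=
  match loc with
  | [] => f
  | p :: rest => pvG rest (fun x y =>
      if 0 ≤ p.2.1 ∧ p.2.1 < 20 ∧ 0 ≤ p.1 ∧ p.1 < 10 ∧ x = p.2.1.toNat ∧ y = p.1.toNat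
      then p.2.2 else f x y)

lemma pvGridFun_congr {f f' : Nat → Nat → Int × Int × Int}
    (h : ∀ x, x < 20 → ∀ y, y < 10 → f x y = f' x y) : pvGridFun f = pvGridFun f' := by
  unfold pvGridFun
  refine List.map_congr_left (fun a ha => ?_)
  refine List.map_congr_left (fun b hb => ?_)
  exact h a (List.mem_range.mp ha) b (List.mem_range.mp hb)

lemma pvGrid0_eq : List.replicate 20 (List.replicate 10 ((0 : Int), (0 : Int), (0 : Int)))
    = pvGridFun (fun _ _ => ((0 : Int), (0 : Int), (0 : Int))) := by
  unfold pvGridFun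
  simp [List.map_const']

lemma pvRow_set (h : Nat → Int × Int × Int) (b : Nat) (_hb : b < 10) (c : Int × Int × Int) :
    ((List.range 10).map h).set b c = (List.range 10).map (fun y => if y = b then c else h y) := by
  apply List.ext_getElem
  · simp
  · intro j h1 h2
    rw [List.getElem_set]
    simp only [List.getElem_map, List.getElem_range]
    by_cases e : b = j
    · rw [if_pos e, if_pos e.symm]
    · rw [if_neg e, if_neg (fun h' => e h'.symm)]

lemma pvGridFun_set (f : Nat → Nat → Int × Int × Int) (a b : Nat) (_ha : a < 20) (hb : b < 10)
    (c : Int × Int × Int) :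
    (pvGridFun f).modify a (fun row => row.set b c)
      = pvGridFun (fun x y => if x = a ∧ y = b then c else f x y) := by
  apply List.ext_getElem
  · simp [pvGridFun]
  · intro i h1 h2
    rw [List.getElem_modify]
    simp only [pvGridFun, List.getElem_map, List.getElem_range] at *
    by_cases e : a = i
    · subst e
      rw [if_pos rfl, pvRow_set (f a) b hb c]
      refine List.map_congr_left (fun y hy => ?_)
      by_cases ey : y = b
      · rw [if_pos ey, if_pos ⟨rfl, ey⟩]
      · rw [if_neg ey, if_neg (fun h' => ey h'.2)]
    · rw [if_neg e]
      refine (List.map_congr_left (fun y hy => ?_)).symm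
      rw [if_neg (fun h' => e h'.1.symm)]

-- ---- B side ----

lemma pvFoldB (loc : List (Int × Int × Int × Int × Int)) :
    ∀ f : Nat → Nat → Int × Int × Int,
    loc.foldl (fun g p =>
      if 0 ≤ p.2.1 ∧ p.2.1 < 20 ∧ 0 ≤ p.1 ∧ p.1 < 10 then
        g.modify p.2.1.toNat (fun row => row.set p.1.toNat p.2.2)
      else g) (pvGridFun f) = pvGridFun (pvG loc f) := by
  induction loc with
  | nil => intro f; rfl
  | cons p rest ih =>
    intro f
    simp only [List.foldl_cons, pvG]
    by_cases hB : 0 ≤ p.2.1 ∧ p.2.1 < 20 ∧ 0 ≤ p.1 ∧ p.1 < 10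
    · obtain ⟨hb1, hb2, hb3, hb4⟩ := hB
      rw [if_pos ⟨hb1, hb2, hb3, hb4⟩,
        pvGridFun_set f p.2.1.toNat p.1.toNat (by omega) (by omega) p.2.2, ih]
      have hfe : (fun x y => if x = p.2.1.toNat ∧ y = p.1.toNat then p.2.2 else f x y)
          = (fun x y => if 0 ≤ p.2.1 ∧ p.2.1 < 20 ∧ 0 ≤ p.1 ∧ p.1 < 10 ∧
              x = p.2.1.toNat ∧ y = p.1.toNat then p.2.2 else f x y) := by
        funext x y
        by_cases hc : x = p.2.1.toNat ∧ y = p.1.toNat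
        · rw [if_pos hc, if_pos ⟨hb1, hb2, hb3, hb4, hc.1, hc.2⟩]
        · rw [if_neg hc, if_neg (fun h' => hc ⟨h'.2.2.2.2.1, h'.2.2.2.2.2⟩)]
      rw [hfe]
    · rw [if_neg hB, ih,
        show (fun x y => if 0 ≤ p.2.1 ∧ p.2.1 < 20 ∧ 0 ≤ p.1 ∧ p.1 < 10 ∧
            x = p.2.1.toNat ∧ y = p.1.toNat then p.2.2 else f x y) = f from
          funext fun x => funext fun y =>
            if_neg (fun h' => hB ⟨h'.1, h'.2.1, h'.2.2.1, h'.2.2.2.1⟩)]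

lemma pvG_eval_none (loc : List (Int × Int × Int × Int × Int)) (a b : Nat)
    (h : loc.find? (fun p => p.1 == (b : Int) && p.2.1 == (a : Int)) = none) :
    ∀ f, pvG loc f a b = f a b := by
  induction loc with
  | nil => intro f; rfl
  | cons p rest ih =>
    intro f
    by_cases hp : (p.1 == (b : Int) && p.2.1 == (a : Int)) = true
    · rw [List.find?_cons_of_pos (p := fun q : Int × Int × Int × Int × Int => q.1 == (b : Int) && q.2.1 == (a : Int)) hp] at h
      exact absurd h (by simp)
    · rw [List.find?_cons_of_neg (p := fun q : Int × Int × Int × Int × Int => q.1 == (b : Int) && q.2.1 == (a : Int)) hp] at h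
      simp only [pvG]
      rw [ih h, if_neg]
      intro hc
      obtain ⟨h1, _, h3, _, hx, hy⟩ := hc
      apply hp
      simp only [Bool.and_eq_true, beq_iff_eq]
      constructor <;> omega

lemma pvG_eval (loc : List (Int × Int × Int × Int × Int)) (a b : Nat)
    (ha : a < 20) (hb : b < 10)
    (hnd : (loc.map (fun p => (p.1, p.2.1))).Nodup) :
    ∀ f, pvG loc f a b = pvCellA loc (a : Int) b (f a b) := by
  induction loc with
  | nil => intro f; rfl
  | cons p rest ih =>
    intro f
    simp only [List.map_cons, List.nodup_cons] at hnd
    by_cases hm : (p.1 == (b : Int) && p.2.1 == (a : Int)) = true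
    · simp only [Bool.and_eq_true, beq_iff_eq] at hm
      have hrest : rest.find? (fun p => p.1 == (b : Int) && p.2.1 == (a : Int)) = none := by
        rw [List.find?_eq_none]
        intro q hq hqp
        simp only [Bool.and_eq_true, beq_iff_eq] at hqp
        refine hnd.1 ?_
        rw [show ((p.1, p.2.1) : Int × Int) = (q.1, q.2.1) from by rw [hqp.1, hqp.2, hm.1, hm.2]]
        exact List.mem_map.mpr ⟨q, hq, rfl⟩
      simp only [pvG]
      rw [pvG_eval_none rest a b hrest,
        if_pos ⟨by omega, by omega, by omega, by omega, by omega, by omega⟩]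
      unfold pvCellA
      rw [List.find?_cons_of_pos (p := fun q : Int × Int × Int × Int × Int => q.1 == (b : Int) && q.2.1 == (a : Int)) (by simp only [Bool.and_eq_true, beq_iff_eq]; exact ⟨hm.1, hm.2⟩)]
    · simp only [pvG]
      rw [ih hnd.2]
      unfold pvCellA
      rw [List.find?_cons_of_neg (p := fun q : Int × Int × Int × Int × Int => q.1 == (b : Int) && q.2.1 == (a : Int)) hm]
      cases hres : rest.find? (fun p => p.1 == (b : Int) && p.2.1 == (a : Int)) with
      | some q => rfl
      | none =>
        rw [if_neg]
        intro hc
        obtain ⟨h1, _, h3, _, hx, hy⟩ := hc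
        apply hm
        simp only [Bool.and_eq_true, beq_iff_eq]
        constructor <;> omega

-- ---- A side ----

lemma pvInnerA (loc : List (Int × Int × Int × Int × Int)) (i : Int)
    (hi0 : 0 ≤ i) (hi : i < 20) :
    ∀ n : Nat, n ≤ 10 → ∀ f : Nat → Nat → Int × Int × Int,
    (PySem.List.pyRange 0 (n : Int) 1).foldl (fun g j =>
      match loc.find? (fun p => p.1 == j && p.2.1 == i) with
      | some p => g.modify i.toNat (fun row => row.set j.toNat p.2.2)
      | none => g) (pvGridFun f)
    = pvGridFun (fun x y =>
        if x = i.toNat ∧ y < n then pvCellA loc i y (f x y) else f x y) := by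
  intro n
  induction n with
  | zero =>
    intro _ f
    rw [PySem.List.pyRange_one_eq_nil (by omega)]
    simp only [List.foldl_nil]
    apply pvGridFun_congr
    intro x _ y _
    rw [if_neg]; omega
  | succ n ih =>
    intro hn f
    have h1 : ((n + 1 : Nat) : Int) = (n : Int) + 1 := by push_cast; ring
    rw [h1, PySem.List.pyRange_one_succ_right (by omega), List.foldl_append,
      ih (by omega) f]
    simp only [List.foldl_cons, List.foldl_nil]
    cases hres : loc.find? (fun p => p.1 == (n : Int) && p.2.1 == i) with
    | some p =>
      simp only
      rw [pvGridFun_set _ i.toNat ((n : Int)).toNat (by omega) (by omega) p.2.2]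
      apply pvGridFun_congr
      intro x _ y _
      simp only [Int.toNat_natCast]
      by_cases hx : x = i.toNat
      · by_cases hy : y = n
        · rw [if_pos ⟨hx, hy⟩, if_pos (show x = i.toNat ∧ y < n + 1 from ⟨hx, by omega⟩)]
          subst hy
          unfold pvCellA
          rw [hres]
        · rw [if_neg (by omega)]
          by_cases hyn : y < n
          · rw [if_pos ⟨hx, hyn⟩, if_pos ⟨hx, by omega⟩]
          · rw [if_neg (by omega), if_neg (by omega)]
      · rw [if_neg (by omega), if_neg (by omega), if_neg (by omega)]
    | none =>
      simp only
      apply pvGridFun_congr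
      intro x _ y _
      by_cases hx : x = i.toNat
      · by_cases hy : y = n
        · rw [if_neg (by omega), if_pos ⟨hx, by omega⟩]
          subst hy
          unfold pvCellA
          rw [hres]
        · by_cases hyn : y < n
          · rw [if_pos ⟨hx, hyn⟩, if_pos ⟨hx, by omega⟩]
          · rw [if_neg (by omega), if_neg (by omega)]
      · rw [if_neg (by omega), if_neg (by omega)]

lemma pvOuterA (loc : List (Int × Int × Int × Int × Int)) :
    ∀ m : Nat, m ≤ 20 → ∀ f : Nat → Nat → Int × Int × Int,
    (PySem.List.pyRange 0 (m : Int) 1).foldl (fun g i =>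
      (PySem.List.pyRange 0 10 1).foldl (fun g j =>
        match loc.find? (fun p => p.1 == j && p.2.1 == i) with
        | some p => g.modify i.toNat (fun row => row.set j.toNat p.2.2)
        | none => g) g) (pvGridFun f)
    = pvGridFun (fun x y =>
        if x < m ∧ y < 10 then pvCellA loc (x : Int) y (f x y) else f x y) := by
  intro m
  induction m with
  | zero =>
    intro _ f
    rw [show PySem.List.pyRange 0 ((0 : Nat) : Int) 1 = [] from
      PySem.List.pyRange_one_eq_nil (by norm_num)]
    simp only [List.foldl_nil]
    apply pvGridFun_congr
    intro x _ y _
    rw [if_neg (show ¬(x < 0 ∧ y < 10) from by omega)]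
  | succ m ih =>
    intro hm f
    have h1 : ((m + 1 : Nat) : Int) = (m : Int) + 1 := by push_cast; ring
    rw [h1, PySem.List.pyRange_one_succ_right (by omega), List.foldl_append,
      ih (by omega) f]
    simp only [List.foldl_cons, List.foldl_nil]
    have h10 : ((10 : Int)) = ((10 : Nat) : Int) := by norm_num
    rw [h10, pvInnerA loc (m : Int) (by omega) (by omega) 10 (by omega)]
    apply pvGridFun_congr
    intro x hx20 y hy10
    simp only [Int.toNat_natCast]
    by_cases hx : x = m
    · subst hx
      rw [if_neg (show ¬(x < x ∧ y < 10) from by omega),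
        if_pos (show x = x ∧ y < 10 from ⟨rfl, hy10⟩),
        if_pos (show x < x + 1 ∧ y < 10 from ⟨by omega, hy10⟩)]
    · rw [if_neg (show ¬(x = m ∧ y < 10) from fun h' => hx h'.1)]
      by_cases hxm : x < m
      · rw [if_pos (show x < m ∧ y < 10 from ⟨hxm, hy10⟩),
          if_pos (show x < m + 1 ∧ y < 10 from ⟨by omega, hy10⟩)]
      · rw [if_neg (show ¬(x < m ∧ y < 10) from by omega),
          if_neg (show ¬(x < m + 1 ∧ y < 10) from by omega)]

-- ===== VERDICT (by name: the statement is the Claim_ definition above) =====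
theorem show_grid_spec : Claim_equal_show_grid := by
  intro loc _ hpre
  unfold Spec_show_grid show_grid show_grid_alt
  simp only [pvGrid0_eq]
  have h20 : ((20 : Int)) = ((20 : Nat) : Int) := by norm_num
  rw [pvFoldB loc, h20, pvOuterA loc 20 (by omega)]
  apply pvGridFun_congr
  intro x hx y hy
  rw [if_pos ⟨hx, hy⟩, pvG_eval loc x y hx hy hpre]
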